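-- pv_equiv track=rewrite | github.com/cclarktcp/dynafunc | dynafunc/builder/util.py | _remove_code_specific_co_flags
-- ===== SOURCE A (Python) =====
-- CODE_FLAGS_MAP = {
--     "CO_OPTIMIZED": 1,
--     "CO_NEWLOCALS": 2,
--     "CO_VARARGS": 4,
--     "CO_VARKEYWORDS": 8,
--     "CO_NESTED": 16,
--     "CO_GENERATOR": 32,
--     "CO_NOFREE": 64,
--     "CO_COROUTINE": 128,
--     "CO_ITERABLE_COROUTINE": 256,
--     "CO_ASYNC_GENERATOR": 512
-- }
--
-- def code_flags_to_bitmap(co_flags):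
--     bitmap = dict()
--     for flag, num in CODE_FLAGS_MAP.items():
--         bitmap[flag] = bool(co_flags & num)
--     return bitmap
--
-- def bitmap_to_code_flags(bitmap):
--     co_flags = 0
--     for k,v in bitmap.items():
--         if bool(v):
--             num = CODE_FLAGS_MAP.get(k)
--         else:
--             num = 0
--         co_flags |= num
--     return co_flags
--
-- def _remove_code_specific_co_flags(co_flags):
--     todel = [
--         "CO_NOFREE",
--         "CO_NESTED",
--         "CO_GENERATOR",
--         "CO_COROUTINE",
--         "CO_ITERABLE_COROUTINE",
--         "CO_ASYNC_GENERATOR",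
--     ]
--     bitmap = code_flags_to_bitmap(co_flags)
--     for key in todel:
--         if key in bitmap:
--             bitmap[key] = False
--
--     return bitmap_to_code_flags(bitmap)
-- ===== SOURCE B (Python) =====
-- CODE_FLAGS_MAP = {
--     "CO_OPTIMIZED": 1,
--     "CO_NEWLOCALS": 2,
--     "CO_VARARGS": 4,
--     "CO_VARKEYWORDS": 8,
--     "CO_NESTED": 16,
--     "CO_GENERATOR": 32,
--     "CO_NOFREE": 64,
--     "CO_COROUTINE": 128,
--     "CO_ITERABLE_COROUTINE": 256,
--     "CO_ASYNC_GENERATOR": 512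
-- }
--
--
-- def _remove_code_specific_co_flags(co_flags):
--     todel = {
--         "CO_NOFREE",
--         "CO_NESTED",
--         "CO_GENERATOR",
--         "CO_COROUTINE",
--         "CO_ITERABLE_COROUTINE",
--         "CO_ASYNC_GENERATOR",
--     }
--     keep_mask = sum(num for flag, num in CODE_FLAGS_MAP.items()
--                     if flag not in todel)
--     return co_flags & keep_mask
-- ===== Notes on version B (the rewrite author's own statement) =====
-- stated objective: simpler
-- what changed: Replaces the bitmap-dict round trip (build a dict of per-flag bools, clear the deleted entries, OR the survivors back together) with a single AND against the keep-mask summed from the flags that are not deleted; this also reproduces A's silent dropping of bits outside the known flags.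
import Mathlib
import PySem

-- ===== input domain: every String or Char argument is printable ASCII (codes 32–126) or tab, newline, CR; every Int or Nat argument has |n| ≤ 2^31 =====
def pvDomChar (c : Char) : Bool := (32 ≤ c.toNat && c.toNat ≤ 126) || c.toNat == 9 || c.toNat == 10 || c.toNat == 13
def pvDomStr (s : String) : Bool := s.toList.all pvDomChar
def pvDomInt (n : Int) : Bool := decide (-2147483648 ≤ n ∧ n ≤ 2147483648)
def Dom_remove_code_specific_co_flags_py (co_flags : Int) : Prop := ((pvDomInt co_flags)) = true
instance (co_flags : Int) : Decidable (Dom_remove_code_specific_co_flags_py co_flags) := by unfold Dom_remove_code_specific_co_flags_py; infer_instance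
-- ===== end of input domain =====

-- B replaces A's bitmap-dict round trip by a single AND with the keep-mask summed
-- from the flags that are not deleted (objective: simpler).

-- ===== PORT A =====
def CODE_FLAGS_MAP : PySem.Dict String Int := PySem.Dict.ofList
  [("CO_OPTIMIZED", 1), ("CO_NEWLOCALS", 2), ("CO_VARARGS", 4), ("CO_VARKEYWORDS", 8),
   ("CO_NESTED", 16), ("CO_GENERATOR", 32), ("CO_NOFREE", 64), ("CO_COROUTINE", 128),
   ("CO_ITERABLE_COROUTINE", 256), ("CO_ASYNC_GENERATOR", 512)]

def code_flags_to_bitmap (co_flags : Int) : PySem.Dict String Bool :=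
  CODE_FLAGS_MAP.items.foldl
    (fun bitmap p => bitmap.insert p.1 (decide (PySem.Int.band co_flags p.2 ≠ 0)))
    PySem.Dict.empty

-- Python's `co_flags |= CODE_FLAGS_MAP.get(k)`: .get returns None only for keys absent
-- from CODE_FLAGS_MAP, where `|=` would raise TypeError; every key iterated here is
-- present, so `.getD 0` is exact on all reachable inputs.
def bitmap_to_code_flags (bitmap : PySem.Dict String Bool) : Int :=
  bitmap.items.foldl
    (fun co_flags p =>
      PySem.Int.bor co_flags (if p.2 then (CODE_FLAGS_MAP.get? p.1).getD 0 else 0))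
    0

def remove_code_specific_co_flags_py (co_flags : Int) : Int :=
  let todel : List String :=
    ["CO_NOFREE", "CO_NESTED", "CO_GENERATOR", "CO_COROUTINE",
     "CO_ITERABLE_COROUTINE", "CO_ASYNC_GENERATOR"]
  let bitmap := code_flags_to_bitmap co_flags
  let bitmap := todel.foldl
    (fun bm key => if bm.contains key then bm.insert key false else bm) bitmap
  bitmap_to_code_flags bitmap

-- ===== PORT B =====
def remove_code_specific_co_flags_py_alt (co_flags : Int) : Int :=
  let todel : PySem.Set String := PySem.Set.ofList
    ["CO_NOFREE", "CO_NESTED", "CO_GENERATOR", "CO_COROUTINE",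
     "CO_ITERABLE_COROUTINE", "CO_ASYNC_GENERATOR"]
  let keep_mask : Int := CODE_FLAGS_MAP.items.foldl
    (fun s p => if p.1 ∈ todel then s else s + p.2) 0
  PySem.Int.band co_flags keep_mask

-- ===== PRECONDITION & SPEC =====
def Spec_remove_code_specific_co_flags_py (co_flags : Int) (out : Int) : Prop := out = remove_code_specific_co_flags_py_alt co_flags
instance (co_flags : Int) (out : Int) : Decidable (Spec_remove_code_specific_co_flags_py co_flags out) := by unfold Spec_remove_code_specific_co_flags_py; infer_instance

-- ===== CLAIM (what is proved, stated in full; the proofs are below) =====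
def Claim_equal_remove_code_specific_co_flags_py : Prop := ∀ (co_flags : Int), Dom_remove_code_specific_co_flags_py co_flags → Spec_remove_code_specific_co_flags_py co_flags (remove_code_specific_co_flags_py co_flags)

-- ===== LEMMAS AND PROOFS =====

-- n &&& v only reads the low 10 bits of n when v < 1024
theorem pv_and_mod (n v : Nat) (hv : v < 1024) : n &&& v = n % 1024 &&& v := by
  apply Nat.eq_of_testBit_eq
  intro i
  by_cases hi : i < 10
  · have hmod : n % 1024 = n % 2 ^ 10 := by norm_num
    rw [hmod]
    simp only [Nat.testBit_and, Nat.testBit_mod_two_pow]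
    simp [hi]
  · have hvb : v.testBit i = false :=
      Nat.testBit_lt_two_pow (lt_of_lt_of_le hv (by
        calc (1024 : Nat) = 2 ^ 10 := rfl
        _ ≤ 2 ^ i := Nat.pow_le_pow_right (by norm_num) (by omega)))
    simp [Nat.testBit_and, hvb]

set_option maxRecDepth 8192 in
theorem pv_sub_xor (w : Nat) (hw : w < 1024) : 1023 - w = 1023 ^^^ w := by
  have : ∀ r : Fin 1024, 1023 - r.val = 1023 ^^^ r.val := by decide
  exact this ⟨w, hw⟩

theorem pv_add_or (a b : Nat) (h : a &&& b = 0) : a + b = a ||| b := by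
  induction a using Nat.strong_induction_on generalizing b with
  | _ a ih =>
    rcases Nat.eq_zero_or_pos a with ha | ha
    · simp [ha]
    · have h2 : (a / 2) &&& (b / 2) = 0 := by rw [← Nat.and_div_two, h]
      have ih2 : a / 2 + b / 2 = (a / 2) ||| (b / 2) :=
        ih (a / 2) (Nat.div_lt_self ha (by norm_num)) (b / 2) h2
      have hdo : (a ||| b) / 2 = (a / 2) ||| (b / 2) := Nat.or_div_two
      have hb0 := Nat.testBit_and a b 0
      have ho0 := Nat.testBit_or a b 0
      rw [h] at hb0
      simp only [Nat.testBit_zero] at hb0 ho0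
      rw [← Bool.decide_or] at ho0
      have ho0' : (a ||| b) % 2 = 1 ↔ a % 2 = 1 ∨ b % 2 = 1 := decide_eq_decide.mp ho0
      rw [← Bool.decide_and] at hb0
      have hb0' : ¬(a % 2 = 1 ∧ b % 2 = 1) :=
        of_decide_eq_false (by simpa using hb0.symm)
      have hda := Nat.div_add_mod a 2
      have hdb := Nat.div_add_mod b 2
      have hdo2 := Nat.div_add_mod (a ||| b) 2
      have hmo := Nat.mod_two_eq_zero_or_one (a ||| b)
      omega

theorem pv_split (v w : Nat) (hv : v < 1024) :
    (v &&& w) + (v &&& (1023 ^^^ w)) = v := by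
  have hand : (v &&& w) &&& (v &&& (1023 ^^^ w)) = 0 := by
    apply Nat.eq_of_testBit_eq
    intro i
    by_cases hi : i < 10
    · have h1023 : (1023 : Nat).testBit i = true := by interval_cases i <;> decide
      simp [Nat.testBit_and, Nat.testBit_xor, h1023]
      cases w.testBit i <;> simp
    · have hvb : v.testBit i = false :=
        Nat.testBit_lt_two_pow (lt_of_lt_of_le hv (by
          calc (1024 : Nat) = 2 ^ 10 := rfl
          _ ≤ 2 ^ i := Nat.pow_le_pow_right (by norm_num) (by omega)))
      simp [Nat.testBit_and, hvb]
  have hor : (v &&& w) ||| (v &&& (1023 ^^^ w)) = v := by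
    apply Nat.eq_of_testBit_eq
    intro i
    by_cases hi : i < 10
    · have h1023 : (1023 : Nat).testBit i = true := by interval_cases i <;> decide
      simp [Nat.testBit_or, Nat.testBit_and, Nat.testBit_xor, h1023]
      cases w.testBit i <;> cases v.testBit i <;> simp
    · have hvb : v.testBit i = false :=
        Nat.testBit_lt_two_pow (lt_of_lt_of_le hv (by
          calc (1024 : Nat) = 2 ^ 10 := rfl
          _ ≤ 2 ^ i := Nat.pow_le_pow_right (by norm_num) (by omega)))
      simp [Nat.testBit_or, Nat.testBit_and, hvb]
  rw [pv_add_or _ _ hand, hor]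

theorem pv_sub_and (v w : Nat) (hv : v < 1024) (hw : w < 1024) :
    (1023 - w) &&& v = v - (v &&& w) := by
  rw [pv_sub_xor w hw, Nat.and_comm]
  have := pv_split v w hv
  omega

-- Python's & only reads the low 10 bits of x when the mask is below 1024
theorem pv_band_mod (x v : Int) (hv0 : 0 ≤ v) (hv : v < 1024) :
    PySem.Int.band x v = PySem.Int.band (x % 1024) v := by
  have hvnat : v.toNat < 1024 := by omega
  by_cases hx : 0 ≤ x
  · have hr : 0 ≤ x % 1024 := Int.emod_nonneg x (by norm_num)
    have htn : (x % 1024).toNat = x.toNat % 1024 := by omega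
    simp only [PySem.Int.band, if_pos hx, if_pos hr, if_pos hv0, htn]
    rw [pv_and_mod x.toNat v.toNat hvnat]
  · have hr : 0 ≤ x % 1024 := Int.emod_nonneg x (by norm_num)
    have htn : (x % 1024).toNat = 1023 - ((-x - 1).toNat % 1024) := by omega
    simp only [PySem.Int.band, if_neg hx, if_pos hr, if_pos hv0, htn]
    have h1 : v.toNat &&& (-x - 1).toNat = v.toNat &&& ((-x - 1).toNat % 1024) := by
      rw [Nat.and_comm, pv_and_mod _ _ hvnat, Nat.and_comm]
    rw [h1, pv_sub_and v.toNat ((-x - 1).toNat % 1024) hvnat (Nat.mod_lt _ (by norm_num))]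

theorem pv_bitmap_per (x : Int) :
    code_flags_to_bitmap x = code_flags_to_bitmap (x % 1024) := by
  have hitems : CODE_FLAGS_MAP.items =
      [("CO_OPTIMIZED", 1), ("CO_NEWLOCALS", 2), ("CO_VARARGS", 4), ("CO_VARKEYWORDS", 8),
       ("CO_NESTED", 16), ("CO_GENERATOR", 32), ("CO_NOFREE", 64), ("CO_COROUTINE", 128),
       ("CO_ITERABLE_COROUTINE", 256), ("CO_ASYNC_GENERATOR", 512)] := by decide
  simp only [code_flags_to_bitmap, hitems, List.foldl]
  rw [pv_band_mod x 1 (by norm_num) (by norm_num), pv_band_mod x 2 (by norm_num) (by norm_num),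
      pv_band_mod x 4 (by norm_num) (by norm_num), pv_band_mod x 8 (by norm_num) (by norm_num),
      pv_band_mod x 16 (by norm_num) (by norm_num), pv_band_mod x 32 (by norm_num) (by norm_num),
      pv_band_mod x 64 (by norm_num) (by norm_num), pv_band_mod x 128 (by norm_num) (by norm_num),
      pv_band_mod x 256 (by norm_num) (by norm_num), pv_band_mod x 512 (by norm_num) (by norm_num)]

theorem pv_A_per (x : Int) :
    remove_code_specific_co_flags_py x = remove_code_specific_co_flags_py (x % 1024) := by
  simp only [remove_code_specific_co_flags_py]
  rw [pv_bitmap_per]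

theorem pv_B_per (x : Int) :
    remove_code_specific_co_flags_py_alt x = remove_code_specific_co_flags_py_alt (x % 1024) := by
  simp only [remove_code_specific_co_flags_py_alt]
  rw [pv_band_mod x _ (by decide) (by decide)]

set_option maxHeartbeats 4000000 in
set_option maxRecDepth 100000 in
theorem pv_residues (r : Fin 1024) :
    remove_code_specific_co_flags_py (r.val : Int) =
    remove_code_specific_co_flags_py_alt (r.val : Int) := by revert r; decide

-- ===== VERDICT (by name: the statement is the Claim_ definition above) =====
theorem remove_code_specific_co_flags_py_spec : Claim_equal_remove_code_specific_co_flags_py := by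
  intro x _
  unfold Spec_remove_code_specific_co_flags_py
  rw [pv_A_per, pv_B_per]
  have hr0 : 0 ≤ x % 1024 := Int.emod_nonneg x (by norm_num)
  have hr1 : x % 1024 < 1024 := Int.emod_lt_of_pos x (by norm_num)
  have hk : ((x % 1024).toNat : Int) = x % 1024 := by omega
  rw [← hk]
  exact pv_residues ⟨(x % 1024).toNat, by omega⟩
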